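-- pv_equiv track=rewrite | github.com/bshelor/cardinal-directions | src/cardinal_coords.py | getCounty
-- ===== SOURCE A (Python) =====
-- def getCounty(lst):
--     county = ""
--     for string in lst:
--         for char in string:
--             if char != ',':
--                 county += char
--             else:
--                 return county
--         county += " "
-- ===== SOURCE B (Python) =====
-- def getCounty(lst):
--     s = " ".join(lst)
--     i = s.find(',')
--     if i != -1:
--         return s[:i]
--     return None
-- ===== Notes on version B (the rewrite author's own statement) =====
-- stated objective: idiomatic
-- what changed: Replaces the interleaved char-by-char accumulation with early return inside a nested loop by precomputing the full ' '.join of the list, then a single find of the first comma and one slice (None when no comma is found).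
import Mathlib
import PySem

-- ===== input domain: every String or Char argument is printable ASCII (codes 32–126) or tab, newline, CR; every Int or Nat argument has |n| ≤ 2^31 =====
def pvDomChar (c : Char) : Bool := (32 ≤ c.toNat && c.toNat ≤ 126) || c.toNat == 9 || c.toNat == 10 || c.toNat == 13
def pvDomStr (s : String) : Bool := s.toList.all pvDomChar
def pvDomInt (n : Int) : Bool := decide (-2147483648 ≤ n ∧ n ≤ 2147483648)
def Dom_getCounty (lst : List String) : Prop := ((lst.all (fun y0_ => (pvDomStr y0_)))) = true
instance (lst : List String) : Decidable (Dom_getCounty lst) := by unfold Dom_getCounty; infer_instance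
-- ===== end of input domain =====

-- B replaces A's interleaved char-by-char build with early return by a precomputed
-- " ".join plus one find of the first comma and a slice (objective: idiomatic).

-- ===== PORT A =====
-- inner loop 'for char in string': .inr = early 'return county', .inl = fell through
def getCountyInner (county : List Char) : List Char → (List Char ⊕ List Char)
  | [] => Sum.inl county
  | c :: cs => if c ≠ ',' then getCountyInner (county ++ [c]) cs else Sum.inr county

-- outer loop 'for string in lst'; falling off the loop returns Python's implicit None
def getCountyOuter (county : List Char) : List String → Option String
  | [] => none
  | s :: rest =>
    match getCountyInner county s.toList with
    | Sum.inr county' => some (String.ofList county')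
    | Sum.inl county' => getCountyOuter (county' ++ [' ']) rest

def getCounty (lst : List String) : Option String :=
  getCountyOuter [] lst

-- ===== PORT B =====
def getCounty_alt (lst : List String) : Option String :=
  let s := PySem.Str.join " " lst
  let i := PySem.Str.find s ","
  if i ≠ -1 then some (PySem.Str.slice s none (some i)) else none

-- ===== PRECONDITION & SPEC =====
def Spec_getCounty (lst : List String) (out : Option String) : Prop := out = getCounty_alt lst
instance (lst : List String) (out : Option String) : Decidable (Spec_getCounty lst out) := by unfold Spec_getCounty; infer_instance

-- ===== CLAIM (what is proved, stated in full; the proofs are below) =====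
def Claim_equal_getCounty : Prop := ∀ (lst : List String), Dom_getCounty lst → Spec_getCounty lst (getCounty lst)

-- ===== LEMMAS AND PROOFS =====

theorem singleton_prefix_iff_head? (a : Char) (l : List Char) :
    ([a] <+: l) ↔ l.head? = some a := by
  cases l with
  | nil => simp
  | cons b t => simp [List.cons_prefix_cons, eq_comm]

theorem takeWhile_append_stop (p : Char → Bool) :
    ∀ (a b : List Char), (∃ x ∈ a, ¬ p x) → (a ++ b).takeWhile p = a.takeWhile p := by
  intro a
  induction a with
  | nil => intro b h; simp at h
  | cons c cs ih =>
    intro b h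
    by_cases hc : p c
    · simp only [List.cons_append, List.takeWhile_cons, hc, if_pos]
      rcases h with ⟨x, hx, hpx⟩
      rcases List.mem_cons.mp hx with rfl | hx'
      · exact absurd hc hpx
      · rw [ih b ⟨x, hx', hpx⟩]
    · simp [hc]

theorem takeWhile_append_all (p : Char → Bool) :
    ∀ (a b : List Char), (∀ x ∈ a, p x) → (a ++ b).takeWhile p = a ++ b.takeWhile p := by
  intro a
  induction a with
  | nil => intro b _; simp
  | cons c cs ih =>
    intro b h
    have hc : p c := h c (List.mem_cons_self)
    simp only [List.cons_append, List.takeWhile_cons, hc, if_pos]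
    rw [ih b (fun x hx => h x (List.mem_cons_of_mem _ hx))]

theorem inner_eq (cs : List Char) : ∀ (county : List Char),
    getCountyInner county cs =
      if ',' ∈ cs then Sum.inr (county ++ cs.takeWhile (fun c => !(c == ',')))
      else Sum.inl (county ++ cs) := by
  induction cs with
  | nil => intro county; simp [getCountyInner]
  | cons c cs ih =>
    intro county
    by_cases hc : c = ','
    · subst hc; simp [getCountyInner]
    · have hc' : ¬ (',' = c) := fun h => hc h.symm
      simp [getCountyInner, hc, hc', ih, List.append_assoc]

-- the characters A has accumulated = the join of the strings seen so far, each followed by ' '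
theorem outer_eq (lst : List String) : ∀ (county : List Char),
    getCountyOuter county lst =
      (let J := PySem.Chars.join [' '] (lst.map String.toList)
       if ',' ∈ J then some (String.ofList (county ++ J.takeWhile (fun c => !(c == ',')))) else none) := by
  induction lst with
  | nil => intro county; simp [getCountyOuter, PySem.Chars.join_nil]
  | cons s rest ih =>
    intro county
    simp only [getCountyOuter, inner_eq]
    by_cases hs : ',' ∈ s.toList
    · -- comma inside this string: both stop here
      have hJ : ',' ∈ PySem.Chars.join [' '] ((s :: rest).map String.toList) := by
        cases rest with
        | nil => simpa [PySem.Chars.join_singleton] using hs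
        | cons t r => simp [List.map, PySem.Chars.join_cons_cons]; left; exact hs
      rw [if_pos hs]
      simp only [hJ, if_pos]
      congr 1
      cases rest with
      | nil => simp [PySem.Chars.join_singleton]
      | cons t r =>
        simp only [List.map, PySem.Chars.join_cons_cons]
        congr 1
        rw [List.append_assoc,
          takeWhile_append_stop _ _ _ ⟨',', hs, by simp⟩]
    · -- no comma here: A appends the string and a space and continues
      rw [if_neg hs]
      show getCountyOuter ((county ++ s.toList) ++ [' ']) rest = _
      rw [ih]
      have hall : ∀ x ∈ s.toList ++ [' '], (fun c => !(c == ',')) x = true := by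
        intro x hx
        rcases List.mem_append.mp hx with h | h
        · simp; rintro rfl; exact hs h
        · simp at h; simp [h]
      cases rest with
      | nil =>
        simp only [List.map, PySem.Chars.join_nil, PySem.Chars.join_singleton]
        simp [hs]
      | cons t r =>
        simp only [List.map, PySem.Chars.join_cons_cons]
        have hmem : (',' ∈ s.toList ++ [' '] ++ PySem.Chars.join [' '] (t.toList :: r.map String.toList))
            ↔ ',' ∈ PySem.Chars.join [' '] (t.toList :: r.map String.toList) := by
          simp [hs]
        by_cases hr : ',' ∈ PySem.Chars.join [' '] (t.toList :: r.map String.toList)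
        · rw [if_pos hr, if_pos (hmem.mpr hr)]
          congr 1
          rw [takeWhile_append_all _ _ _ hall]
          simp [List.append_assoc]
        · rw [if_neg hr, if_neg (fun h => hr (hmem.mp h))]

-- take up to the first failing index is takeWhile
theorem take_eq_takeWhile (p : Char → Bool) : ∀ (J : List Char) (n : Nat),
    (∀ i, i < n → ∀ (hi : i < J.length), p J[i]) → (hn : n < J.length) → ¬ p (J[n]'hn) →
    J.take n = J.takeWhile p := by
  intro J
  induction J with
  | nil => intro n _ hn; simp at hn
  | cons c cs ih =>
    intro n hall hn hfail
    cases n with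
    | zero =>
      simp at hfail
      simp [hfail]
    | succ m =>
      have hc : p c := by
        have := hall 0 (by omega) (by simp)
        simpa using this
      simp only [List.take_succ_cons, List.takeWhile_cons, hc, if_pos]
      congr 1
      exact ih m (fun i hi hilen => by
          have := hall (i+1) (by omega) (by simpa using Nat.succ_lt_succ hilen)
          simpa using this)
        (by simpa using Nat.lt_of_succ_lt_succ hn) (by simpa using hfail)

theorem getCounty_eq_canon (lst : List String) :
    getCounty lst =
      (let J := PySem.Chars.join [' '] (lst.map String.toList)
       if ',' ∈ J then some (String.ofList (J.takeWhile (fun c => !(c == ',')))) else none) := by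
  simpa using outer_eq lst []

theorem alt_canon_aux (s : String) (J : List Char) (hJ : s.toList = J) :
    (if PySem.Str.find s "," ≠ -1 then some (PySem.Str.slice s none (some (PySem.Str.find s ","))) else none)
      = if ',' ∈ J then some (String.ofList (J.takeWhile (fun c => !(c == ',')))) else none := by
  subst hJ
  have hfind : PySem.Str.find s "," = PySem.Chars.find s.toList [','] := by
    simp [PySem.Str.find_eq]
  by_cases hmem : ',' ∈ s.toList
  · have hinf : [','] <:+: s.toList := (List.singleton_infix_iff ',' s.toList).mpr hmem
    have hne : PySem.Chars.find s.toList [','] ≠ -1 :=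
      (PySem.Chars.find_ne_neg_one_iff _ _).mpr hinf
    have hnn : 0 ≤ PySem.Chars.find s.toList [','] :=
      (PySem.Chars.find_nonneg_iff _ _).mpr hinf
    obtain ⟨hpre, hmin⟩ := PySem.Chars.find_spec hnn
    set n : Nat := (PySem.Chars.find s.toList [',']).toNat with hndef
    have hhead : (s.toList.drop n).head? = some ',' := (singleton_prefix_iff_head? _ _).mp hpre
    rw [List.head?_drop] at hhead
    have hnlt : n < s.toList.length := by
      by_contra h
      rw [List.getElem?_eq_none (by omega)] at hhead
      simp at hhead
    have hgetn : s.toList[n]'hnlt = ',' := by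
      rw [List.getElem?_eq_getElem hnlt] at hhead
      exact Option.some.inj hhead
    have hslice : PySem.Str.slice s none (some (PySem.Str.find s ",")) =
        String.ofList (s.toList.takeWhile (fun c => !(c == ','))) := by
      apply String.toList_inj.mp
      rw [PySem.Str.toList_slice, PySem.Chars.slice_eq_listSlice,
        hfind, PySem.List.slice_to _ hnn]
      show s.toList.take n = _
      rw [String.toList_ofList]
      refine take_eq_takeWhile (fun c => !(c == ',')) s.toList n ?_ hnlt (by simp [hgetn])
      intro i hi hilen
      have hnp := hmin i (by omega)
      rw [singleton_prefix_iff_head?, List.head?_drop, List.getElem?_eq_getElem hilen] at hnp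
      simp only [Bool.not_eq_true', beq_eq_false_iff_ne, ne_eq]
      intro hEq; exact hnp (by rw [hEq])
    rw [if_pos hmem, if_pos (by rw [hfind]; exact hne), hslice]
  · have : PySem.Chars.find s.toList [','] = -1 :=
      (PySem.Chars.find_eq_neg_one_iff _ _).mpr
        (fun h => hmem ((List.singleton_infix_iff ',' s.toList).mp h))
    rw [if_neg hmem, if_neg (by rw [hfind, this]; simp)]

theorem getCounty_alt_eq_canon (lst : List String) :
    getCounty_alt lst =
      (let J := PySem.Chars.join [' '] (lst.map String.toList)
       if ',' ∈ J then some (String.ofList (J.takeWhile (fun c => !(c == ',')))) else none) := by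
  have hJ : (PySem.Str.join " " lst).toList = PySem.Chars.join [' '] (lst.map String.toList) := by
    rw [PySem.Str.toList_join]
    congr 1
  exact alt_canon_aux (PySem.Str.join " " lst) _ hJ

-- ===== VERDICT (by name: the statement is the Claim_ definition above) =====
theorem getCounty_spec : Claim_equal_getCounty := by
  intro lst _
  unfold Spec_getCounty
  rw [getCounty_eq_canon, getCounty_alt_eq_canon]
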